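-- pv_equiv track=rewrite | github.com/pixelrunner/aoc22 | Day3/day3.py | workOutDuplicate
-- ===== SOURCE A (Python) =====
-- def workOutDuplicate(packList, partNo):
--     n = 0
--     # iterate through each backpack
--     for packItem in packList:
--
--         # iterate through letters in first half and see if letter in both
--         for letter in packItem[0]:
--             if letter in packItem[1]:
--                 if partNo == 2:
--                     if letter in packItem[2]:
--                         # letter found - add it to the list
--                         packList[n].append(letter)
--                         break
--                 else:
--                     # letter found - add it to the list
--                     packList[n].append(letter)
--                     break
--         n += 1
--     return packList
-- ===== SOURCE B (Python) =====
-- def workOutDuplicate(packList, partNo):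
--     # set-intersection of the compartments, then pick the letter occurring
--     # earliest in the first compartment (same in-place append as the original)
--     for packItem in packList:
--         if not packItem[0]:
--             continue
--         common = set(packItem[0]) & set(packItem[1])
--         if partNo == 2 and common:
--             common &= set(packItem[2])
--         if common:
--             packItem.append(min(common, key=packItem[0].index))
--     return packList
-- ===== Notes on version B (the rewrite author's own statement) =====
-- stated objective: simpler
-- what changed: Replaces A's ordered scan of the first compartment with nested substring-membership tests and a break by a set intersection of the compartments followed by a min-by-first-index selection of the shared letter.
import Mathlib
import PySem

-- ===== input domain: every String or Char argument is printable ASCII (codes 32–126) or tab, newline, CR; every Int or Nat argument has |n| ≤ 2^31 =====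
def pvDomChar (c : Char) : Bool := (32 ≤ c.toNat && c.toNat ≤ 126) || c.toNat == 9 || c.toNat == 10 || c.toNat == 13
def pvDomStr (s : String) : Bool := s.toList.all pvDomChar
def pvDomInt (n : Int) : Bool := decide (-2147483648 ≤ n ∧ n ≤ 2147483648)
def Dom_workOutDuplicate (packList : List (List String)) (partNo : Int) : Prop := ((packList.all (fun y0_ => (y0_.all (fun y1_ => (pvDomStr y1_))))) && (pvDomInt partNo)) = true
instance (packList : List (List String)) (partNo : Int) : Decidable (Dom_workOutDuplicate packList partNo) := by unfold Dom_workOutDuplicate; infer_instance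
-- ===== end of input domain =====

-- B replaces A's ordered scan-and-break with a set intersection of the compartments plus a
-- min-by-first-index selection (objective: simpler). Both Pythons append to the inner lists
-- in place; the equivalence proved here is about the returned value.


-- ===== PORT A =====
-- A's inner loop: scan the letters of the first compartment, break at the first letter found
-- in compartment 1 (and, for part 2, also in compartment 2).  'letter in packItem[1]' on a
-- single-character string is exactly character membership.
def aScan (letters : List Char) (p1 p2 : List Char) (partNo : Int) : Option Char :=
  match letters with
  | [] => none
  | c :: rest =>
    if c ∈ p1 then
      if partNo = 2 then
        if c ∈ p2 then some c else aScan rest p1 p2 partNo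
      else some c
    else aScan rest p1 p2 partNo

-- one iteration of A's outer loop on pack index n (compartments read with getD; inputs where
-- Python would raise IndexError are excluded by Pre_ below)
def aPack (p : List String) (partNo : Int) : List String :=
  match aScan (p.getD 0 "").toList (p.getD 1 "").toList (p.getD 2 "").toList partNo with
  | some c => p ++ [String.ofList [c]]
  | none => p

def workOutDuplicate (packList : List (List String)) (partNo : Int) : List (List String) :=
  packList.map (fun p => aPack p partNo)

-- ===== PORT B =====
-- B's body for one pack: if not p[0]: continue; common = set(p[0]) & set(p[1]);
-- if partNo == 2 and common: common &= set(p[2]); if common: append min(common, key=p[0].index)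
def bPack (p : List String) (partNo : Int) : List String :=
  if (p.getD 0 "").toList = [] then p
  else
    match PySem.List.min?
        (if partNo = 2 ∧ PySem.Set.inter (PySem.Set.ofList (p.getD 0 "").toList) (p.getD 1 "").toList ≠ [] then
          PySem.Set.inter (PySem.Set.inter (PySem.Set.ofList (p.getD 0 "").toList) (p.getD 1 "").toList)
            (p.getD 2 "").toList
        else PySem.Set.inter (PySem.Set.ofList (p.getD 0 "").toList) (p.getD 1 "").toList)
        (fun c => (PySem.List.index? (p.getD 0 "").toList c).getD 0) with
    | some c => p ++ [String.ofList [c]]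
    | none => p

def workOutDuplicate_alt (packList : List (List String)) (partNo : Int) : List (List String) :=
  packList.map (fun p => bPack p partNo)

-- ===== PRECONDITION & SPEC =====
-- Pre_ excludes exactly the inputs on which A raises IndexError (and B raises it too): an
-- empty pack, a one-compartment pack whose first compartment is nonempty, and for part 2 a
-- pack with fewer than three compartments whose first two compartments share a letter.
def Pre_workOutDuplicate (packList : List (List String)) (partNo : Int) : Prop :=
  ∀ p ∈ packList, p ≠ [] ∧
    ((p.getD 0 "").toList ≠ [] → 2 ≤ p.length) ∧
    (partNo = 2 → (∃ c ∈ (p.getD 0 "").toList, c ∈ (p.getD 1 "").toList) → 3 ≤ p.length)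
instance (packList : List (List String)) (partNo : Int) : Decidable (Pre_workOutDuplicate packList partNo) := by unfold Pre_workOutDuplicate; infer_instance

def pvWitness_workOutDuplicate : List (List String) × Int := ([["ab", "cb"], ["xy", "zz"]], 1)

def Spec_workOutDuplicate (packList : List (List String)) (partNo : Int) (out : List (List String)) : Prop := out = workOutDuplicate_alt packList partNo
instance (packList : List (List String)) (partNo : Int) (out : List (List String)) : Decidable (Spec_workOutDuplicate packList partNo out) := by unfold Spec_workOutDuplicate; infer_instance

-- ===== CLAIM (what is proved, stated in full; the proofs are below) =====
def Claim_equal_workOutDuplicate : Prop := ∀ (packList : List (List String)) (partNo : Int), Dom_workOutDuplicate packList partNo → Pre_workOutDuplicate packList partNo → Spec_workOutDuplicate packList partNo (workOutDuplicate packList partNo)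

-- ===== LEMMAS AND PROOFS =====

-- the predicate "this letter is a hit" shared by both analyses
def hit (p1 p2 : List Char) (partNo : Int) (c : Char) : Bool :=
  if partNo = 2 then decide (c ∈ p1) && decide (c ∈ p2) else decide (c ∈ p1)

lemma aScan_eq_find? (letters p1 p2 : List Char) (partNo : Int) :
    aScan letters p1 p2 partNo = letters.find? (hit p1 p2 partNo) := by
  induction letters with
  | nil => rfl
  | cons c rest ih =>
    simp only [aScan, List.find?, hit]
    split_ifs with h1 h2 h3 <;> simp_all

-- B's short-circuit 'and common' does not change the value: intersecting [] still gives []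
lemma guarded_eq_unguarded (p0 p1 p2 : List Char) (partNo : Int) :
    (if partNo = 2 ∧ PySem.Set.inter (PySem.Set.ofList p0) p1 ≠ [] then
        PySem.Set.inter (PySem.Set.inter (PySem.Set.ofList p0) p1) p2
      else PySem.Set.inter (PySem.Set.ofList p0) p1)
    = (if partNo = 2 then
        PySem.Set.inter (PySem.Set.inter (PySem.Set.ofList p0) p1) p2
      else PySem.Set.inter (PySem.Set.ofList p0) p1) := by
  by_cases h2 : partNo = 2
  · by_cases hne : PySem.Set.inter (PySem.Set.ofList p0) p1 ≠ []
    · simp [h2, hne]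
    · rw [not_ne_iff] at hne
      rw [hne]
      simp [PySem.Set.inter]
  · simp [h2]

lemma common_eq_filter (p0 p1 p2 : List Char) (partNo : Int) :
    (if partNo = 2 then
        PySem.Set.inter (PySem.Set.inter (PySem.Set.ofList p0) p1) p2
      else PySem.Set.inter (PySem.Set.ofList p0) p1)
    = (PySem.Set.ofList p0).filter (hit p1 p2 partNo) := by
  by_cases h : partNo = 2
  · simp only [h, if_true, PySem.Set.inter, List.filter_filter]
    exact List.filter_congr (fun a _ => by simp [hit, Bool.and_comm])
  · simp only [if_neg h, PySem.Set.inter, List.filter_filter]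
    exact List.filter_congr (fun a _ => by simp [hit, h])

-- min-by-first-index over the set of hitting letters of p0 is the first hitting letter of p0
lemma min?_filter_eq_find? (p0 : List Char) (pred : Char → Bool) :
    PySem.List.min? ((PySem.Set.ofList p0).filter pred)
        (fun c => (PySem.List.index? p0 c).getD 0) = p0.find? pred := by
  cases h : p0.find? pred with
  | none =>
    rw [List.find?_eq_none] at h
    have : (PySem.Set.ofList p0).filter pred = [] := by
      rw [List.filter_eq_nil_iff]
      intro a ha
      exact h a ((PySem.Set.mem_ofList p0 a).mp ha)
    rw [this]
    rfl
  | some r =>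
    obtain ⟨hr, as, bs, hsplit, hprefix⟩ := List.find?_eq_some_iff_append.mp h
    subst hsplit
    have hrp0 : r ∈ as ++ r :: bs := by simp
    have hrl : r ∈ (PySem.Set.ofList (as ++ r :: bs)).filter pred := by
      rw [List.mem_filter, PySem.Set.mem_ofList]; exact ⟨hrp0, hr⟩
    -- r's first index is as.length (nothing in as hits, so r does not occur there)
    have hrnotas : r ∉ as := by
      intro hmem
      have := hprefix r hmem
      simp [hr] at this
    have hidxr : PySem.List.index? (as ++ r :: bs) r = some as.length :=
      (PySem.List.index?_eq_some_iff _ _ _).mpr ⟨as, bs, rfl, rfl, hrnotas⟩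
    cases hm : PySem.List.min? ((PySem.Set.ofList (as ++ r :: bs)).filter pred)
        (fun c => (PySem.List.index? (as ++ r :: bs) c).getD 0) with
    | none =>
      rw [PySem.List.min?_eq_none_iff] at hm
      rw [hm] at hrl
      simp at hrl
    | some m =>
      have hml := PySem.List.min?_mem hm
      have hmp0 : m ∈ as ++ r :: bs := (PySem.Set.mem_ofList _ m).mp (List.mem_filter.mp hml).1
      have hmpred : pred m = true := (List.mem_filter.mp hml).2
      obtain ⟨km, hkm⟩ := Option.isSome_iff_exists.mp
        ((PySem.List.index?_isSome_iff _ _).mpr hmp0)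
      obtain ⟨hklt, hkeq, hkfirst⟩ := PySem.List.getElem_of_index?_eq_some hkm
      -- min?'s value has key ≤ key r = as.length
      have hle : (PySem.List.index? (as ++ r :: bs) m).getD 0 ≤
          (PySem.List.index? (as ++ r :: bs) r).getD 0 :=
        PySem.List.min?_isMin hm r hrl
      rw [hidxr, hkm] at hle
      simp only [Option.getD_some] at hle
      -- and km cannot be < as.length: the letters there all fail pred
      have hge : as.length ≤ km := by
        by_contra hcon
        have hlt : km < as.length := Nat.lt_of_not_le hcon
        have hmem : (as ++ r :: bs)[km] ∈ as := by
          rw [List.getElem_append_left hlt]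
          exact List.getElem_mem _
        have := hprefix _ hmem
        rw [hkeq] at this
        simp [hmpred] at this
      have hkmeq : km = as.length := le_antisymm hle hge
      have hfin : (as ++ r :: bs)[km] = r := by
        subst hkmeq
        rw [List.getElem_append_right (Nat.le_refl _)]
        simp
      rw [hkeq] at hfin
      rw [hfin]

lemma pack_eq (p : List String) (partNo : Int) : aPack p partNo = bPack p partNo := by
  unfold aPack bPack
  by_cases h0 : (p.getD 0 "").toList = []
  · rw [h0]
    simp [aScan]
  · rw [if_neg h0, guarded_eq_unguarded,
      common_eq_filter (p.getD 0 "").toList (p.getD 1 "").toList (p.getD 2 "").toList partNo,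
      min?_filter_eq_find?, aScan_eq_find?]

-- ===== VERDICT (by name: the statement is the Claim_ definition above) =====
theorem workOutDuplicate_spec : Claim_equal_workOutDuplicate := by
  intro packList partNo _ _
  unfold Spec_workOutDuplicate workOutDuplicate workOutDuplicate_alt
  exact List.map_congr_left (fun p _ => pack_eq p partNo)
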